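-- pv_equiv track=rewrite | github.com/kasper201/AutoPilot | Wifi/Nicla/wifiConnect3.py | extract_integer_from_string
-- ===== SOURCE A (Python) =====
-- def extract_integer_from_string(input_string):
--     keyword = "Integer%3D"
--     try:
--         # Find the start index of the keyword
--         start_index = input_string.index(keyword) + len(keyword)
--         # Slice the string from the end of the keyword to the end of the string
--         substring = input_string[start_index:]
--         # Find where the number ends
--         end_index = start_index
--         while end_index < len(input_string) and input_string[end_index].isdigit():
--             end_index += 1
--         # Convert the extracted substring to an integer
--         integer_value = int(input_string[start_index:end_index])
--         return integer_value
--     except (ValueError, IndexError) as e: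
--         return None
-- ===== SOURCE B (Python) =====
-- def extract_integer_from_string(input_string):
--     _, sep, rest = input_string.partition("Integer%3D")
--     if not sep:
--         return None
--     digits = ""
--     for ch in rest:
--         if not ch.isdigit():
--             break
--         digits += ch
--     return int(digits) if digits else None
-- ===== Notes on version B (the rewrite author's own statement) =====
-- stated objective: idiomatic
-- what changed: Replaces index()+try/except+index-based while loop+slicing by str.partition to split off the text after the keyword and a single for-each-char loop with break that accumulates the digit prefix, returning None explicitly instead of via a caught ValueError.
import Mathlib
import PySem

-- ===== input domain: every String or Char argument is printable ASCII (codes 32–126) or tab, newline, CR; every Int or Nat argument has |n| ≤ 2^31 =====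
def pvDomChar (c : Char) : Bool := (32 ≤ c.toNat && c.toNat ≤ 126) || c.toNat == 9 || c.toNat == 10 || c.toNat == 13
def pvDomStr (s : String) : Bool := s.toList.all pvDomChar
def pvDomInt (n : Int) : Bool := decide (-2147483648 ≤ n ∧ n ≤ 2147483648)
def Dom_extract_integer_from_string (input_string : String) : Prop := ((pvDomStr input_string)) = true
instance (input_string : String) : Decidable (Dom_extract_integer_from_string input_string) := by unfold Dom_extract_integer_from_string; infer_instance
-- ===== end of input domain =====

-- B replaces A's index()/try-except/index-while/slice machinery by str.partition plus a
-- for-each-char loop with break that accumulates the digit prefix (idiomatic; same cost).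

-- ===== PORT A =====
-- A's while loop: advance end_index while it is in range and the character is a digit
def pvAEnd (s : List Char) (i : Nat) : Nat :=
  if h : i < s.length then
    if PySem.Chars.isdigit s[i] then pvAEnd s (i + 1) else i
  else i
termination_by s.length - i

def extract_integer_from_string (input_string : String) : Option Int :=
  let s := input_string.toList
  let keyword := "Integer%3D".toList
  let idx := PySem.Chars.find s keyword
  if idx = -1 then none  -- input_string.index(keyword) raises ValueError, caught: return None
  else
    let start_index : Nat := idx.toNat + keyword.length
    let _substring := PySem.Chars.slice s (some (start_index : Int)) none  -- computed but unused, as in A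
    let end_index : Nat := pvAEnd s start_index
    -- int("") raises ValueError (caught: None); ofChars? is none exactly there
    PySem.Int.ofChars? (PySem.Chars.slice s (some (start_index : Int)) (some (end_index : Int)))

-- ===== PORT B =====
-- input_string.partition(kw): the part after the first occurrence of kw, none if kw is absent
def pvBRest? (kw : List Char) : List Char → Option (List Char)
  | [] => none
  | c :: t => if kw.isPrefixOf (c :: t) then some (List.drop kw.length (c :: t)) else pvBRest? kw t

-- B's for-loop with break: collect the leading digits
def pvBDigits : List Char → List Char
  | [] => []
  | c :: t => if PySem.Chars.isdigit c then c :: pvBDigits t else []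

def extract_integer_from_string_alt (input_string : String) : Option Int :=
  match pvBRest? "Integer%3D".toList input_string.toList with
  | none => none
  | some rest =>
    let digits := pvBDigits rest
    if digits.isEmpty then none else PySem.Int.ofChars? digits

-- ===== PRECONDITION & SPEC =====
def Spec_extract_integer_from_string (input_string : String) (out : Option Int) : Prop := out = extract_integer_from_string_alt input_string
instance (input_string : String) (out : Option Int) : Decidable (Spec_extract_integer_from_string input_string out) := by unfold Spec_extract_integer_from_string; infer_instance

-- ===== CLAIM (what is proved, stated in full; the proofs are below) =====
def Claim_equal_extract_integer_from_string : Prop := ∀ (input_string : String), Dom_extract_integer_from_string input_string → Spec_extract_integer_from_string input_string (extract_integer_from_string input_string)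

-- ===== LEMMAS AND PROOFS =====

theorem pvBRest?_eq_none {kw : List Char} (hkw : kw ≠ []) (s : List Char) :
    pvBRest? kw s = none ↔ ¬ kw <:+: s := by
  induction s with
  | nil => simp [pvBRest?, List.infix_nil, hkw]
  | cons c t ih =>
    rw [List.infix_cons_iff]
    unfold pvBRest?
    by_cases hp : kw.isPrefixOf (c :: t)
    · simp [hp, List.isPrefixOf_iff_prefix.mp hp]
    · have : ¬ kw <+: (c :: t) := fun h => hp (List.isPrefixOf_iff_prefix.mpr h)
      simp [hp, ih, this]

theorem pvBRest?_eq_some {kw : List Char} (hkw : kw ≠ []) (s : List Char) (k : Nat)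
    (hpre : kw <+: s.drop k) (hmin : ∀ i < k, ¬ kw <+: s.drop i) :
    pvBRest? kw s = some (s.drop (k + kw.length)) := by
  induction s generalizing k with
  | nil =>
    exfalso
    rw [List.drop_nil] at hpre
    exact hkw (List.prefix_nil.mp hpre)
  | cons c t ih =>
    cases k with
    | zero =>
      rw [List.drop_zero] at hpre
      unfold pvBRest?
      rw [if_pos (List.isPrefixOf_iff_prefix.mpr hpre)]
      simp
    | succ j =>
      have h0 : ¬ kw <+: (c :: t) := by
        have := hmin 0 (Nat.succ_pos j)
        simpa using this
      unfold pvBRest?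
      rw [if_neg (fun h => h0 (List.isPrefixOf_iff_prefix.mp h))]
      have := ih j (by simpa using hpre) (fun i hi => by simpa using hmin (i + 1) (by omega))
      simpa [Nat.succ_add] using this

theorem pvAEnd_eq (s : List Char) (i : Nat) :
    pvAEnd s i = i + ((s.drop i).takeWhile PySem.Chars.isdigit).length := by
  unfold pvAEnd
  split
  · rename_i h
    rw [List.drop_eq_getElem_cons h]
    by_cases hd : PySem.Chars.isdigit s[i] = true
    · rw [if_pos hd, pvAEnd_eq s (i + 1), List.takeWhile_cons_of_pos hd, List.length_cons]
      omega
    · rw [if_neg hd, List.takeWhile_cons_of_neg hd, List.length_nil]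
      omega
  · rename_i h
    rw [List.drop_eq_nil_of_le (by omega), List.takeWhile_nil, List.length_nil]
    omega
termination_by s.length - i

theorem pvBDigits_eq_takeWhile (l : List Char) :
    pvBDigits l = l.takeWhile PySem.Chars.isdigit := by
  induction l with
  | nil => rfl
  | cons c t ih =>
    unfold pvBDigits
    rw [List.takeWhile]
    split <;> simp_all

theorem take_length_takeWhile {α : Type} (p : α → Bool) (l : List α) :
    l.take ((l.takeWhile p).length) = l.takeWhile p :=
  (List.prefix_iff_eq_take.mp (List.takeWhile_prefix p)).symm

-- ===== VERDICT (by name: the statement is the Claim_ definition above) =====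
theorem extract_integer_from_string_spec : Claim_equal_extract_integer_from_string := by
  intro input_string _
  show extract_integer_from_string input_string = extract_integer_from_string_alt input_string
  unfold extract_integer_from_string extract_integer_from_string_alt
  set l := input_string.toList with hl
  set kw := "Integer%3D".toList with hkwdef
  have hkw : kw ≠ [] := by decide
  by_cases hf : PySem.Chars.find l kw = -1
  · rw [if_pos hf, (pvBRest?_eq_none hkw l).mpr ((PySem.Chars.find_eq_neg_one_iff l kw).mp hf)]
  · rw [if_neg hf]
    have hge : 0 ≤ PySem.Chars.find l kw := by
      have := PySem.Chars.neg_one_le_find l kw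
      omega
    obtain ⟨hpre, hmin⟩ := PySem.Chars.find_spec hge
    rw [pvBRest?_eq_some hkw l _ hpre hmin]
    set k := (PySem.Chars.find l kw).toNat
    set st := k + kw.length with hst
    have hslice : PySem.Chars.slice l (some (st : Int)) (some ((pvAEnd l st : Nat) : Int))
        = pvBDigits (l.drop st) := by
      rw [PySem.Chars.slice_eq_listSlice, pvAEnd_eq, PySem.List.slice_natCast,
        Nat.add_sub_cancel_left, pvBDigits_eq_takeWhile, take_length_takeWhile]
    show PySem.Int.ofChars? (PySem.Chars.slice l (some (st : Int)) (some ((pvAEnd l st : Nat) : Int)))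
      = (if (pvBDigits (List.drop st l)).isEmpty then none
         else PySem.Int.ofChars? (pvBDigits (List.drop st l)))
    rw [hslice]
    cases hD : pvBDigits (List.drop st l) with
    | nil => simp only [List.isEmpty_nil, if_pos]; rfl
    | cons d ds => simp
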